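-- pv_equiv track=rewrite | github.com/Tilapiatsu/blender-custom_config | scripts/addons/uvpackmaster3/utils.py | unique_min_num
-- ===== SOURCE A (Python) =====
-- def unique_min_num(num_list, num_from=0):
--     if not num_list:
--         return num_from
--     counter = num_from
--     while True:
--         counter += 1
--         if counter in num_list:
--             continue
--         return counter
-- ===== SOURCE B (Python) =====
-- def unique_min_num(num_list, num_from=0):
--     if not num_list:
--         return num_from
--     expected = num_from + 1
--     for c in sorted(set(x for x in num_list if x > num_from)):
--         if c == expected:
--             expected += 1
--         elif c > expected:
--             break
--     return expected
-- ===== Notes on version B (the rewrite author's own statement) =====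
-- stated objective: alternative
-- what changed: Replaces the unbounded counter loop with repeated list membership tests by a single ascending scan over sorted(set(candidates > num_from)) that finds the first gap.
import Mathlib
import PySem

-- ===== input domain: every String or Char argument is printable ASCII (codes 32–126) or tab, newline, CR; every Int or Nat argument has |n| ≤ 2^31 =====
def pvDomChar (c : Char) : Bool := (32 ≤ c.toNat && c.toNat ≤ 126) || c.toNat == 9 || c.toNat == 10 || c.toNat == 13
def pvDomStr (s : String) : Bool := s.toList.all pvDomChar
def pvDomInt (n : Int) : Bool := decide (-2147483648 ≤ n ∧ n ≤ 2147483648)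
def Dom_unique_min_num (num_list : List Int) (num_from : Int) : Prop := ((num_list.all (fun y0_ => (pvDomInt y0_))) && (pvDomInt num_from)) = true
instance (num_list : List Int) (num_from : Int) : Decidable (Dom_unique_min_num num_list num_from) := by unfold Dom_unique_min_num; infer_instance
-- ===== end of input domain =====

-- B replaces A's unbounded membership-probing counter loop by one ascending scan
-- over sorted(set(x > num_from)) that finds the first gap (alternative algorithm).


-- ===== PORT A =====
-- A's 'while True' loop; the fuel (num_list.length + 1) only makes it total: the
-- 'continue' branch can be taken at most num_list.length times, so it never runs out.
def uniqueMinLoopA (fuel : Nat) (counter : Int) (num_list : List Int) : Int :=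
  match fuel with
  | 0 => counter
  | f + 1 =>
    let counter' := counter + 1
    if counter' ∈ num_list then uniqueMinLoopA f counter' num_list
    else counter'

def unique_min_num (num_list : List Int) (num_from : Int) : Int :=
  if num_list = [] then num_from
  else uniqueMinLoopA (num_list.length + 1) num_from num_list

-- ===== PORT B =====
-- B's for-loop over the sorted candidates, with the 'break' as an early return.
def uniqueMinScan (cands : List Int) (expected : Int) : Int :=
  match cands with
  | [] => expected
  | c :: rest =>
    if c = expected then uniqueMinScan rest (expected + 1)
    else if expected < c then expected
    else uniqueMinScan rest expected

def unique_min_num_alt (num_list : List Int) (num_from : Int) : Int :=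
  if num_list = [] then num_from
  else
    uniqueMinScan
      (PySem.List.sorted (PySem.Set.ofList (num_list.filter (fun x => num_from < x))) (fun x => x) false)
      (num_from + 1)

-- ===== PRECONDITION & SPEC =====
def Spec_unique_min_num (num_list : List Int) (num_from : Int) (out : Int) : Prop := out = unique_min_num_alt num_list num_from
instance (num_list : List Int) (num_from : Int) (out : Int) : Decidable (Spec_unique_min_num num_list num_from out) := by unfold Spec_unique_min_num; infer_instance

-- ===== CLAIM (what is proved, stated in full; the proofs are below) =====
def Claim_equal_unique_min_num : Prop := ∀ (num_list : List Int) (num_from : Int), Dom_unique_min_num num_list num_from → Spec_unique_min_num num_list num_from (unique_min_num num_list num_from)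

-- ===== LEMMAS AND PROOFS =====

/-- `m` is the first integer above `c` that is not in `l`. -/
def IsFirstGap (l : List Int) (c m : Int) : Prop :=
  c < m ∧ m ∉ l ∧ ∀ j, c < j → j < m → j ∈ l

theorem isFirstGap_unique {l : List Int} {c m m' : Int}
    (h : IsFirstGap l c m) (h' : IsFirstGap l c m') : m = m' := by
  obtain ⟨h1, h2, h3⟩ := h
  obtain ⟨h1', h2', h3'⟩ := h'
  rcases lt_trichotomy m m' with hlt | heq | hgt
  · exact absurd (h3' m h1 hlt) h2
  · exact heq
  · exact absurd (h3 m' h1' hgt) h2'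

theorem le_foldr_max (l : List Int) (c : Int) : ∀ x ∈ l, x ≤ l.foldr max c := by
  induction l with
  | nil => intro x hx; cases hx
  | cons a t ih =>
    intro x hx
    rcases List.mem_cons.mp hx with rfl | hx
    · exact le_max_left _ _
    · exact le_trans (ih x hx) (le_max_right _ _)

theorem exists_firstGap (l : List Int) (c : Int) : ∃ m, IsFirstGap l c m := by
  have hex : ∃ k : Nat, c + 1 + (k : Int) ∉ l := by
    refine ⟨(l.foldr max c - c).toNat, fun hmem => ?_⟩
    have h1 : (l.foldr max c - c : Int) ≤ ((l.foldr max c - c).toNat : Int) := Int.self_le_toNat _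
    have h2 := le_foldr_max l c _ hmem
    omega
  refine ⟨c + 1 + (Nat.find hex : Int), ?_, Nat.find_spec hex, ?_⟩
  · have : (0 : Int) ≤ (Nat.find hex : Int) := Int.natCast_nonneg _
    omega
  · intro j hj1 hj2
    have hj' : ((j - c - 1).toNat : Int) = j - c - 1 := Int.toNat_of_nonneg (by omega)
    have hlt : (j - c - 1).toNat < Nat.find hex := by
      have := Int.natCast_nonneg (Nat.find hex); omega
    have := Nat.find_min hex hlt
    simp only [not_not] at this
    rwa [show c + 1 + ((j - c - 1).toNat : Int) = j by omega] at this

theorem firstGap_le (l : List Int) (c m : Int) (h : IsFirstGap l c m) :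
    m ≤ c + l.length + 1 := by
  obtain ⟨h1, _, h3⟩ := h
  by_contra hcon
  push Not at hcon
  have hsub : Finset.Ioo c m ⊆ l.toFinset := by
    intro j hj
    rw [Finset.mem_Ioo] at hj
    exact List.mem_toFinset.mpr (h3 j hj.1 hj.2)
  have hcard := Finset.card_le_card hsub
  rw [Int.card_Ioo] at hcard
  have h4 := List.toFinset_card_le l
  omega

theorem loopA_correct (l : List Int) (m : Int) :
    ∀ (fuel : Nat) (c : Int), IsFirstGap l c m → m ≤ c + fuel →
      uniqueMinLoopA fuel c l = m := by
  intro fuel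
  induction fuel with
  | zero => intro c h hle; exact absurd hle (by have := h.1; omega)
  | succ f ih =>
    intro c h hle
    obtain ⟨h1, h2, h3⟩ := h
    simp only [uniqueMinLoopA]
    by_cases hmem : c + 1 ∈ l
    · have hne : m ≠ c + 1 := fun he => h2 (he ▸ hmem)
      rw [if_pos hmem]
      exact ih (c + 1) ⟨by omega, h2, fun j hj1 hj2 => h3 j (by omega) hj2⟩ (by omega)
    · have hm : m = c + 1 := by
        rcases lt_trichotomy m (c + 1) with hlt | he | hgt
        · omega
        · exact he
        · exact absurd (h3 (c + 1) (by omega) hgt) hmem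
      rw [if_neg hmem]; omega

theorem scan_correct (l : List Int) (n : Int) :
    ∀ (s : List Int) (e : Int), n < e →
      s.Pairwise (· < ·) →
      (∀ x, e ≤ x → (x ∈ l ↔ x ∈ s)) →
      (∀ x ∈ s, e ≤ x) →
      (∀ j, n < j → j < e → j ∈ l) →
      IsFirstGap l n (uniqueMinScan s e) := by
  intro s
  induction s with
  | nil =>
    intro e hne _ hmem _ hinv
    refine ⟨hne, fun h => ?_, hinv⟩
    · exact absurd ((hmem e le_rfl).mp h) (List.not_mem_nil)
  | cons c rest ih =>
    intro e hne hpw hmem hall hinv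
    have hec : e ≤ c := hall c List.mem_cons_self
    have hrest : ∀ x ∈ rest, c < x := fun x hx => (List.pairwise_cons.mp hpw).1 x hx
    simp only [uniqueMinScan]
    by_cases hce : c = e
    · rw [if_pos hce]
      refine ih (e + 1) (by omega) (List.pairwise_cons.mp hpw).2 ?_ ?_ ?_
      · intro x hx
        have hxc : x ≠ c := by omega
        rw [hmem x (by omega), List.mem_cons]
        exact ⟨fun h => h.resolve_left hxc, Or.inr⟩
      · intro x hx; have := hrest x hx; omega
      · intro j hj1 hj2
        by_cases hje : j = e
        · subst hje
          exact (hmem j le_rfl).mpr (by rw [← hce]; exact List.mem_cons_self)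
        · exact hinv j hj1 (by omega)
    · rw [if_neg hce]
      have hlt : e < c := by omega
      rw [if_pos hlt]
      refine ⟨hne, fun h => ?_, hinv⟩
      rcases List.mem_cons.mp ((hmem e le_rfl).mp h) with h' | h'
      · exact hce (by omega)
      · exact absurd (hrest e h') (by omega)

-- ===== VERDICT (by name: the statement is the Claim_ definition above) =====
theorem unique_min_num_spec : Claim_equal_unique_min_num := by
  intro num_list num_from _
  unfold Spec_unique_min_num unique_min_num unique_min_num_alt
  by_cases hnil : num_list = []
  · simp [hnil]
  · rw [if_neg hnil, if_neg hnil]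
    obtain ⟨m, hm⟩ := exists_firstGap num_list num_from
    have hA := loopA_correct num_list m (num_list.length + 1) num_from hm
      (by have := firstGap_le num_list num_from m hm; push_cast; push_cast at this; omega)
    have hB : IsFirstGap num_list num_from
        (uniqueMinScan (PySem.List.sorted (PySem.Set.ofList (num_list.filter (fun x => num_from < x))) (fun x => x) false) (num_from + 1)) := by
      refine scan_correct num_list num_from _ (num_from + 1) (by omega)
        (PySem.List.sorted_ofList_pairwise_lt _) ?_ ?_ (by intro j h1 h2; omega)
      · intro x hx
        rw [PySem.List.mem_sorted, PySem.Set.mem_ofList, List.mem_filter]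
        constructor
        · intro h; exact ⟨h, by simp; omega⟩
        · intro h; exact h.1
      · intro x hx
        rw [PySem.List.mem_sorted, PySem.Set.mem_ofList, List.mem_filter] at hx
        have := hx.2; simp at this; omega
    rw [hA]
    exact isFirstGap_unique hm hB
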